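-- pv_equiv track=rewrite | github.com/pypi-data/pypi-mirror-68 | packages/batchcompute-cli/batchcompute-cli-1.7.7.tar.gz/batchcompute-cli-1.7.7/src/batchcompute_cli/util/dag.py | removeLowTargets
-- ===== SOURCE A (Python) =====
-- def removeLowTargets(matric):
--     m = {}
--     for i,n in enumerate(matric):
--         for j,n2 in enumerate(n):
--             pos = m.get(n2)
--             if pos:
--                 if pos.get('x') < i:
--                     #remove
--                     # matric[pos.get('x')].pop(pos.get('y'))
--                     matric[pos.get('x')][pos.get('y')] = False
--                     m[n2]  = {'x':i, 'y':j}
--             else: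
--                 m[n2] = {'x':i, 'y':j}
--
--
--     for i, n in enumerate(matric):
--         t=[]
--         for j, n2 in enumerate(n):
--           if n2!=False:
--             t.append(n2)
--         matric[i]=t
--
--     return matric
-- ===== SOURCE B (Python) =====
-- def removeLowTargets(matric):
--     # Precompute, for each value, the last row index where it appears.
--     last = {}
--     for i, row in enumerate(matric):
--         for v in row:
--             last[v] = i
--     # Rebuild each row: drop the first occurrence of any value that
--     # reappears in a later row; everything else (including same-row
--     # duplicates) is kept in order.
--     for i, row in enumerate(matric):
--         dropped = set()
--         t = []
--         for v in row:
--             if v not in dropped and last[v] > i: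
--                 dropped.add(v)
--             else:
--                 t.append(v)
--         matric[i] = t
--     return matric
-- ===== Notes on version B (the rewrite author's own statement) =====
-- stated objective: simpler
-- what changed: B replaces A's stateful in-place marking (a dict of {'x','y'} position records, cells overwritten with False, then a filtering pass) by a precomputed value-to-last-row table and one seen-set pass per row that drops the first occurrence of any value reappearing in a later row.
import Mathlib
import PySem

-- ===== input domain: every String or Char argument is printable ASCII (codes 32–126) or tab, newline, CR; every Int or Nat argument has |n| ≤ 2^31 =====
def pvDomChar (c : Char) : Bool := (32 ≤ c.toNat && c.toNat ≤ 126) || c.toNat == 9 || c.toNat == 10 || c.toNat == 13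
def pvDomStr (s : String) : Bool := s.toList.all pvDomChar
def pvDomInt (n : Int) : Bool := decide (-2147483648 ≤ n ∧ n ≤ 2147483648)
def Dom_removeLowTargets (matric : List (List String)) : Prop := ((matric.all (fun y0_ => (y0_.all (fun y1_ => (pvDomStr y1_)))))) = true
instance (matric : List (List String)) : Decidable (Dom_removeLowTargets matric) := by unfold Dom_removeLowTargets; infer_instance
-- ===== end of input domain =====

-- B replaces A's in-place '= False' marking (dict of {'x','y'} positions, mark-then-filter)
-- by a precomputed last-row table plus one seen-set filtering pass per row; objective:
-- simpler, same return value.  Both A and B mutate the argument's rows in place in Python;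
-- the equivalence proved here is about the return value.

-- ===== PORT A =====
-- Notes on faithfulness of the port of A:
-- * cells are strings, so the sentinel `False` written by `matric[x][y] = False` can never
--   collide with a cell value; it is modelled by `none`, a live cell by `some s`, and the
--   final `n2 != False` filter keeps exactly the `some` cells — exact.
-- * the `{'x': i, 'y': j}` position dict is ported as the pair (i, j); `if pos:` is true
--   exactly when the lookup succeeded (the stored dicts are never empty) — ported as the
--   `some` branch of the lookup.
-- * the first Python loop iterates the live `matric`, but every `= False` write targets a
--   row strictly before the row being iterated (pos['x'] < i), so the values it reads are
--   the original ones; the port therefore folds over the original matrix while threading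
--   the marked copy — exact.
def removeLowTargets (matric : List (List String)) : List (List String) :=
  let st0 : List (List (Option String)) × PySem.Dict String (Int × Int) :=
    (matric.map (fun row => row.map some), PySem.Dict.empty)
  let st := (PySem.List.enumerate matric).foldl (fun st p =>
    (PySem.List.enumerate p.2).foldl (fun st q =>
      match PySem.Dict.get? st.2 q.2 with
      | some pos =>
        if pos.1 < p.1 then
          (PySem.List.pySetD st.1 pos.1
             (PySem.List.pySetD (PySem.List.pyGetD st.1 pos.1 []) pos.2 none),
           PySem.Dict.insert st.2 q.2 (p.1, q.1))
        else st
      | none => (st.1, PySem.Dict.insert st.2 q.2 (p.1, q.1))) st) st0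
  st.1.map (fun row =>
    row.foldl (fun t c => match c with | some s => t ++ [s] | none => t) ([] : List String))

-- ===== PORT B =====
-- `last[v]` in Source B can never raise (every v of a row is a key); ported as getD with
-- an unused default.
def removeLowTargets_alt (matric : List (List String)) : List (List String) :=
  let last : PySem.Dict String Int :=
    (PySem.List.enumerate matric).foldl
      (fun d p => p.2.foldl (fun d v => PySem.Dict.insert d v p.1) d) PySem.Dict.empty
  (PySem.List.enumerate matric).map (fun p =>
    (p.2.foldl (fun (st : PySem.Set String × List String) v =>
        if PySem.Set.contains st.1 v = false ∧ PySem.Dict.getD last v 0 > p.1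
        then (PySem.Set.add st.1 v, st.2)
        else (st.1, st.2 ++ [v]))
      (PySem.Set.empty, ([] : List String))).2)

-- ===== PRECONDITION & SPEC =====
def Spec_removeLowTargets (matric : List (List String)) (out : List (List String)) : Prop := out = removeLowTargets_alt matric
instance (matric : List (List String)) (out : List (List String)) : Decidable (Spec_removeLowTargets matric out) := by unfold Spec_removeLowTargets; infer_instance

-- ===== CLAIM (what is proved, stated in full; the proofs are below) =====
def Claim_equal_removeLowTargets : Prop := ∀ (matric : List (List String)), Dom_removeLowTargets matric → Spec_removeLowTargets matric (removeLowTargets matric)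

-- ===== LEMMAS AND PROOFS =====

def pvLastOcc (rows : List (List String)) (s : Int) (v : String) : Option (Int × Int) :=
  match rows with
  | [] => none
  | r :: rs =>
    match pvLastOcc rs (s + 1) v with
    | some pr => some pr
    | none => match r.idxOf? v with
      | some j => some (s, (j : Int))
      | none => none

theorem pvLastOcc_bounds (rows : List (List String)) (s : Int) (v : String) (pr : Int × Int)
    (h : pvLastOcc rows s v = some pr) :
    ∃ x : Nat, x < rows.length ∧ pr.1 = s + x ∧ (rows[x]?.getD []).idxOf? v = some pr.2.toNat ∧ 0 ≤ pr.2 := by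
  induction rows generalizing s with
  | nil => simp [pvLastOcc] at h
  | cons r rs ih =>
    rw [pvLastOcc] at h
    cases hrs : pvLastOcc rs (s + 1) v with
    | some pr' =>
      rw [hrs] at h; cases h
      obtain ⟨x, hx, h1, h2, h3⟩ := ih (s + 1) hrs
      exact ⟨x + 1, by simpa using hx, by push_cast at *; omega, by simpa using h2, h3⟩
    | none =>
      rw [hrs] at h
      cases hj : r.idxOf? v with
      | some j =>
        rw [hj] at h; cases h
        exact ⟨0, by simp, by simp, by simpa using hj, by simp⟩
      | none => rw [hj] at h; cases h

theorem pvLastOcc_append_singleton (rows : List (List String)) (r : List String) (s : Int) (v : String) :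
    pvLastOcc (rows ++ [r]) s v =
      match r.idxOf? v with
      | some j => some (s + rows.length, (j : Int))
      | none => pvLastOcc rows s v := by
  induction rows generalizing s with
  | nil =>
    cases hj : r.idxOf? v <;> simp [pvLastOcc, hj]
  | cons r' rs ih =>
    rw [List.cons_append, pvLastOcc, ih (s + 1)]
    cases hj : r.idxOf? v with
    | some j =>
      have h2 : (s + 1) + (rs.length : Int) = s + ((r' :: rs).length : Int) := by
        simp only [List.length_cons]; push_cast; ring
      simp only [h2]
    | none =>
      rw [pvLastOcc]

theorem pvLastOcc_ge (rows : List (List String)) (s : Int) (v : String) (x : Nat)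
    (hx : x < rows.length) (hv : v ∈ rows[x]?.getD []) :
    ∃ pr, pvLastOcc rows s v = some pr ∧ s + x ≤ pr.1 := by
  induction rows generalizing s x with
  | nil => simp at hx
  | cons r rs ih =>
    rw [pvLastOcc]
    cases x with
    | zero =>
      cases hrs : pvLastOcc rs (s + 1) v with
      | some pr' =>
        obtain ⟨y, hy, h1, _, _⟩ := pvLastOcc_bounds rs (s+1) v pr' hrs
        exact ⟨pr', rfl, by omega⟩
      | none =>
        simp only [List.getElem?_cons_zero, Option.getD_some] at hv
        have hs : (r.idxOf? v).isSome := List.isSome_idxOf?.2 hv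
        cases hj : r.idxOf? v with
        | none => rw [hj] at hs; simp at hs
        | some j => exact ⟨(s, (j:Int)), rfl, by omega⟩
    | succ x' =>
      obtain ⟨pr, hpr, hge⟩ := ih (s + 1) x' (by simpa using hx) (by simpa using hv)
      rw [hpr]
      exact ⟨pr, rfl, by push_cast at *; omega⟩

theorem pvLastOcc_of_last (rows : List (List String)) (s : Int) (v : String) (x y : Nat)
    (hx : x < rows.length) (hv : (rows[x]?.getD []).idxOf? v = some y)
    (hafter : ((rows.drop (x + 1)).any (fun r => r.contains v)) = false) :
    pvLastOcc rows s v = some (s + x, (y : Int)) := by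
  induction rows generalizing s x with
  | nil => simp at hx
  | cons r rs ih =>
    rw [pvLastOcc]
    cases x with
    | zero =>
      simp only [List.getElem?_cons_zero, Option.getD_some] at hv
      simp only [List.drop_succ_cons, List.drop_zero] at hafter
      have hnone : pvLastOcc rs (s + 1) v = none := by
        cases hrs : pvLastOcc rs (s + 1) v with
        | none => rfl
        | some pr =>
          obtain ⟨x', hx', _, h2, _⟩ := pvLastOcc_bounds rs (s+1) v pr hrs
          have hmem : v ∈ rs[x']?.getD [] := by
            have := List.isSome_idxOf?.1 (by rw [h2]; rfl)
            exact this
          exfalso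
          have : (rs.any (fun r => r.contains v)) = true := by
            rw [List.any_eq_true]
            refine ⟨rs[x']?.getD [], ?_, by simpa using hmem⟩
            have : rs[x']? = some rs[x'] := List.getElem?_eq_getElem hx'
            rw [this]; simpa using List.getElem_mem hx'
          rw [this] at hafter; cases hafter
      rw [hnone, hv]
      simp
    | succ x' =>
      have h1 := ih (s + 1) x' (by simpa using hx) (by simpa using hv)
        (by simpa using hafter)
      rw [h1]
      have h2 : s + 1 + (x' : Int) = s + ((x' + 1 : Nat) : Int) := by push_cast; ring
      rw [h2]

def canonGo (glob : String → Bool) (pre : List String) : List String → List String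
  | [] => []
  | v :: q =>
    if pre.contains v = false ∧ glob v = true then canonGo glob (pre ++ [v]) q
    else v :: canonGo glob (pre ++ [v]) q

def markRowList (glob : String → Bool) (pre : List String) : List String → List (Option String)
  | [] => []
  | v :: q =>
    (if pre.contains v = false ∧ glob v = true then none else some v) :: markRowList glob (pre ++ [v]) q

theorem markRowList_congr (glob glob' : String → Bool) (pre row : List String)
    (h : ∀ w ∈ row, pre.contains w = false → glob w = glob' w) :
    markRowList glob pre row = markRowList glob' pre row := by
  induction row generalizing pre with
  | nil => rfl
  | cons v q ih =>
    have hrec := ih (pre ++ [v]) (fun w hw hc => h w (by simp [hw])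
      (by simp only [List.contains_append] at hc; exact (Bool.or_eq_false_iff.1 hc).1))
    by_cases hc : pre.contains v = false
    · rw [markRowList, markRowList, h v (by simp) hc, hrec]
    · rw [markRowList, markRowList,
        if_neg (by simp only [Bool.not_eq_false] at hc; rw [hc]; simp), if_neg (by simp only [Bool.not_eq_false] at hc; rw [hc]; simp), hrec]

theorem canonGo_congr (glob glob' : String → Bool) (pre row : List String)
    (h : ∀ w ∈ row, pre.contains w = false → glob w = glob' w) :
    canonGo glob pre row = canonGo glob' pre row := by
  induction row generalizing pre with
  | nil => rfl
  | cons v q ih =>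
    have hrec := ih (pre ++ [v]) (fun w hw hc => h w (by simp [hw])
      (by simp only [List.contains_append] at hc; exact (Bool.or_eq_false_iff.1 hc).1))
    by_cases hc : pre.contains v = false
    · rw [canonGo, canonGo, h v (by simp) hc, hrec]
    · rw [canonGo, canonGo,
        if_neg (by simp only [Bool.not_eq_false] at hc; rw [hc]; simp), if_neg (by simp only [Bool.not_eq_false] at hc; rw [hc]; simp), hrec]

theorem markRowList_map_some (glob : String → Bool) (pre row : List String)
    (h : ∀ w ∈ row, glob w = false) :
    markRowList glob pre row = row.map some := by
  induction row generalizing pre with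
  | nil => rfl
  | cons v q ih =>
    rw [markRowList, List.map_cons, ih _ (fun w hw => h w (by simp [hw]))]
    simp [h v (by simp)]

theorem markRowList_set_first (glob glob' : String → Bool) (pre row : List String) (v : String) (j : Nat)
    (hj : row.idxOf? v = some j) (hpre : pre.contains v = false)
    (hv : glob' v = true) (hother : ∀ w ∈ row, w ≠ v → glob w = glob' w) :
    (markRowList glob pre row).set j none = markRowList glob' pre row := by
  induction row generalizing pre j with
  | nil => simp [List.idxOf?] at hj
  | cons w q ih =>
    rw [List.idxOf?_cons] at hj
    by_cases hwv : w = v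
    · subst hwv
      simp only [beq_self_eq_true, if_true] at hj
      cases hj
      rw [markRowList, markRowList, List.set_cons_zero]
      simp only [hpre, hv, and_self, if_true]
      congr 1
      apply markRowList_congr
      intro w' hw' hc
      refine hother w' (by simp [hw']) ?_
      rintro rfl
      simp at hc
    · have hne : (w == v) = false := by simp [hwv]
      rw [hne] at hj
      simp only [Bool.false_eq_true, if_false] at hj
      cases hj' : List.idxOf? v q with
      | none => rw [hj'] at hj; cases hj
      | some j' =>
        rw [hj'] at hj
        simp only [Option.map_some] at hj
        cases hj
        rw [markRowList, markRowList, List.set_cons_succ]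
        have hg : glob w = glob' w := hother w (by simp) hwv
        rw [hg]
        congr 1
        refine ih (pre ++ [w]) j' hj' ?_ (fun w' hw' h2 => hother w' (by simp [hw']) h2)
        simp only [List.contains_append, Bool.or_eq_false_iff]
        exact ⟨hpre, by simp; exact fun h => hwv h.symm⟩

theorem filterMap_markRowList (glob : String → Bool) (pre row : List String) :
    (markRowList glob pre row).filterMap id = canonGo glob pre row := by
  induction row generalizing pre with
  | nil => rfl
  | cons v q ih =>
    rw [markRowList, canonGo]
    by_cases h : pre.contains v = false ∧ glob v = true
    · simp only [h, if_true, and_self]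
      simpa using ih (pre ++ [v])
    · simp only [if_neg h]
      simpa using ih (pre ++ [v])

theorem foldl_filter_none (row : List (Option String)) (acc : List String) :
    row.foldl (fun t c => match c with | some s => t ++ [s] | none => t) acc
      = acc ++ row.filterMap id := by
  induction row generalizing acc with
  | nil => simp
  | cons c q ih =>
    cases c with
    | some s => rw [List.foldl_cons, ih]; simp
    | none => rw [List.foldl_cons, ih]; simp


-- the marking condition while rows `past` are done and prefix `p` of the current row is done
def pvCond (past : List (List String)) (p : List String) (x : Nat) (w : String) : Bool :=
  (past.drop (x + 1)).any (fun r => r.contains w) ||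
    (p.contains w && ((pvLastOcc past 0 w).map (fun pr => pr.1) == some (x : Int)))

def MatInv (M past : List (List String)) (p : List String)
    (mat : List (List (Option String))) : Prop :=
  mat.length = M.length ∧
  ∀ x : Nat, x < M.length →
    mat[x]? = some (markRowList (pvCond past p x) [] (M[x]?.getD []))

def DictInv (k : Int) (past : List (List String)) (p : List String)
    (m : PySem.Dict String (Int × Int)) : Prop :=
  ∀ v, PySem.Dict.get? m v =
    match p.idxOf? v with
    | some j => some (k, (j : Int))
    | none => pvLastOcc past 0 v

theorem idxOf?_snoc (p : List String) (v w : String) :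
    (p ++ [v]).idxOf? w =
      match p.idxOf? w with
      | some j => some j
      | none => if w = v then some p.length else none := by
  induction p with
  | nil =>
    by_cases h : w = v
    · subst h; simp [List.idxOf?_cons]
    · have hb : (v == w) = false := by
        simp only [beq_eq_false_iff_ne, ne_eq]
        exact fun hh => h hh.symm
      simp [List.idxOf?_cons, hb, h]
  | cons a p ih =>
    rw [List.cons_append, List.idxOf?_cons, List.idxOf?_cons, ih]
    by_cases h : a = w
    · simp [h]
    · have : (a == w) = false := by simp [h]
      rw [this]
      simp only [Bool.false_eq_true, if_false]
      cases hp : List.idxOf? w p with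
      | some j => simp
      | none => by_cases hwv : w = v <;> simp [hwv]

theorem innerA (M past : List (List String)) (hlen : past.length < M.length)
    (hpre : ∀ x : Nat, x < past.length → past[x]? = M[x]?) :
    ∀ (q p : List String) (mat : List (List (Option String))) (m : PySem.Dict String (Int × Int)),
      MatInv M past p mat → DictInv (past.length : Int) past p m →
      MatInv M past (p ++ q)
        ((PySem.List.enumerate q (p.length : Int)).foldl (fun st q' =>
          match PySem.Dict.get? st.2 q'.2 with
          | some pos =>
            if pos.1 < ((past.length : Int)) then
              (PySem.List.pySetD st.1 pos.1
                 (PySem.List.pySetD (PySem.List.pyGetD st.1 pos.1 []) pos.2 none),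
               PySem.Dict.insert st.2 q'.2 (((past.length : Int)), q'.1))
            else st
          | none => (st.1, PySem.Dict.insert st.2 q'.2 (((past.length : Int)), q'.1))) (mat, m)).1 ∧
      DictInv (past.length : Int) past (p ++ q)
        ((PySem.List.enumerate q (p.length : Int)).foldl (fun st q' =>
          match PySem.Dict.get? st.2 q'.2 with
          | some pos =>
            if pos.1 < ((past.length : Int)) then
              (PySem.List.pySetD st.1 pos.1
                 (PySem.List.pySetD (PySem.List.pyGetD st.1 pos.1 []) pos.2 none),
               PySem.Dict.insert st.2 q'.2 (((past.length : Int)), q'.1))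
            else st
          | none => (st.1, PySem.Dict.insert st.2 q'.2 (((past.length : Int)), q'.1))) (mat, m)).2 := by
  intro q
  induction q with
  | nil =>
    intro p mat m hmat hdict
    simpa [PySem.List.enumerate] using ⟨hmat, hdict⟩
  | cons v q ih =>
    intro p mat m hmat hdict
    rw [PySem.List.enumerate_cons, List.foldl_cons]
    have hc : ((p ++ [v]).length : Int) = (p.length : Int) + 1 := by simp
    have happ : p ++ v :: q = (p ++ [v]) ++ q := by simp
    cases hpv : p.idxOf? v with
    | some j =>
      have hvp : v ∈ p := List.isSome_idxOf?.1 (by rw [hpv]; rfl)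
      have hget : PySem.Dict.get? m v = some ((past.length : Int), (j : Int)) := by
        rw [hdict v, hpv]
      simp only [hget, lt_self_iff_false, if_false]
      have hco : ∀ w, (p ++ [v]).contains w = p.contains w := by
        intro w
        by_cases hwv : w = v
        · subst hwv
          simp only [List.contains_append, List.contains_cons, List.contains_nil]
          simp [hvp]
        · simp only [List.contains_append, List.contains_cons, List.contains_nil]
          have : (w == v) = false := by simp [hwv]
          simp [this, hwv]
      have hcnd : ∀ x w, pvCond past p x w = pvCond past (p ++ [v]) x w := by
        intro x w; unfold pvCond; rw [hco w]
      have hmat' : MatInv M past (p ++ [v]) mat := by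
        refine ⟨hmat.1, fun x hx => ?_⟩
        rw [hmat.2 x hx]
        congr 1
        exact markRowList_congr _ _ _ _ (fun w _ _ => hcnd x w)
      have hdict' : DictInv (past.length : Int) past (p ++ [v]) m := by
        intro w
        rw [hdict w, idxOf?_snoc]
        cases hpw : p.idxOf? w with
        | some j' => simp
        | none =>
          have hwv : w ≠ v := by rintro rfl; rw [hpv] at hpw; cases hpw
          simp [hwv]
      rw [happ, ← hc]
      exact ih (p ++ [v]) mat m hmat' hdict'
    | none =>
      have hvnp : v ∉ p := by
        intro hmem
        have := List.isSome_idxOf?.2 hmem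
        rw [hpv] at this; cases this
      have hpcv : p.contains v = false := by simpa using hvnp
      have hsnoc_self : (p ++ [v]).idxOf? v = some p.length := by
        rw [idxOf?_snoc, hpv]; simp
      have hdict' : DictInv (past.length : Int) past (p ++ [v])
          (PySem.Dict.insert m v ((past.length : Int), (p.length : Int))) := by
        intro w
        rw [PySem.Dict.get?_insert]
        by_cases hwv : w = v
        · subst hwv
          rw [if_pos rfl, hsnoc_self]
        · rw [if_neg hwv, hdict w, idxOf?_snoc]
          cases hpw : p.idxOf? w with
          | some j' => simp
          | none => simp [hwv]
      cases hLO : pvLastOcc past 0 v with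
      | none =>
        have hget : PySem.Dict.get? m v = none := by rw [hdict v, hpv, hLO]
        simp only [hget]
        have hmat' : MatInv M past (p ++ [v]) mat := by
          refine ⟨hmat.1, fun x hx => ?_⟩
          rw [hmat.2 x hx]
          congr 1
          refine markRowList_congr _ _ _ _ (fun w _ _ => ?_)
          unfold pvCond
          by_cases hwv : w = v
          · subst hwv
            rw [hLO, hpcv]
            simp
          · have : (p ++ [v]).contains w = p.contains w := by
              have : (w == v) = false := by simp [hwv]
              simp [List.contains_append, this, hwv]
            rw [this]
        rw [happ, ← hc]
        exact ih (p ++ [v]) mat _ hmat' hdict'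
      | some pr =>
        have hget : PySem.Dict.get? m v = some pr := by rw [hdict v, hpv, hLO]
        obtain ⟨x0, hx0, hpr1, hidx, hpr2⟩ := pvLastOcc_bounds past 0 v pr hLO
        have hx0M : x0 < M.length := by omega
        have hlt : pr.1 < (past.length : Int) := by
          rw [hpr1]; push_cast; omega
        simp only [hget, if_pos hlt]
        -- compute the marked matrix
        have hrow : (past[x0]?.getD []) = (M[x0]?.getD []) := by rw [hpre x0 hx0]
        have hidxM : (M[x0]?.getD []).idxOf? v = some pr.2.toNat := by rw [← hrow]; exact hidx
        have hpr1' : pr.1 = ((x0 : Nat) : Int) := by omega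
        have hgetrow : PySem.List.pyGetD mat pr.1 [] = markRowList (pvCond past p x0) [] (M[x0]?.getD []) := by
          rw [hpr1', PySem.List.pyGetD_natCast, List.getD_eq_getElem?_getD, hmat.2 x0 hx0M]
          rfl
        have hcondv : pvCond past (p ++ [v]) x0 v = true := by
          unfold pvCond
          rw [hLO]
          have h1 : (p ++ [v]).contains v = true := by simp
          have h2 : ((some pr).map (fun pr => pr.1) == some ((x0 : Nat) : Int)) = true := by
            simp [hpr1']
          rw [h1, h2]
          simp
        have hsetrow : PySem.List.pySetD (PySem.List.pyGetD mat pr.1 []) pr.2 none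
            = markRowList (pvCond past (p ++ [v]) x0) [] (M[x0]?.getD []) := by
          rw [hgetrow, PySem.List.pySetD_of_nonneg _ _ hpr2]
          refine markRowList_set_first _ _ _ _ v pr.2.toNat hidxM (by simp) hcondv ?_
          intro w _ hwv
          unfold pvCond
          have : (p ++ [v]).contains w = p.contains w := by
            have : (w == v) = false := by simp [hwv]
            simp [List.contains_append, this, hwv]
          rw [this]
        have hmatset : PySem.List.pySetD mat pr.1
              (PySem.List.pySetD (PySem.List.pyGetD mat pr.1 []) pr.2 none)
            = mat.set x0 (markRowList (pvCond past (p ++ [v]) x0) [] (M[x0]?.getD [])) := by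
          rw [hsetrow, PySem.List.pySetD_of_nonneg _ _ (by omega : (0:Int) ≤ pr.1), hpr1']
          simp
        rw [hmatset]
        have hmat' : MatInv M past (p ++ [v])
            (mat.set x0 (markRowList (pvCond past (p ++ [v]) x0) [] (M[x0]?.getD []))) := by
          refine ⟨by rw [List.length_set]; exact hmat.1, fun x hx => ?_⟩
          rw [List.getElem?_set]
          by_cases hxx : x0 = x
          · subst hxx
            rw [if_pos rfl, if_pos (by rw [hmat.1]; exact hx0M)]
          · rw [if_neg hxx, hmat.2 x hx]
            congr 1
            refine markRowList_congr _ _ _ _ (fun w _ _ => ?_)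
            unfold pvCond
            by_cases hwv : w = v
            · subst hwv
              rw [hLO, hpcv]
              have : ((some pr).map (fun pr => pr.1) == some ((x : Nat) : Int)) = false := by
                have : pr.1 ≠ ((x : Nat) : Int) := by
                  rw [hpr1']
                  intro hcontra
                  exact hxx (by exact_mod_cast hcontra)
                simp [this]
              rw [this]
              simp
            · have : (p ++ [v]).contains w = p.contains w := by
                have : (w == v) = false := by simp [hwv]
                simp [List.contains_append, this, hwv]
              rw [this]
        rw [happ, ← hc]
        exact ih (p ++ [v]) _ _ hmat' hdict'

theorem pvCond_step (M past : List (List String)) (r : List String)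
    (hlen : past.length < M.length) (hr : M[past.length]? = some r)
    (hpre : ∀ x : Nat, x < past.length → past[x]? = M[x]?)
    (x : Nat) (hx : x < M.length) (w : String) (hw : w ∈ M[x]?.getD []) :
    pvCond past r x w = pvCond (past ++ [r]) [] x w := by
  unfold pvCond
  simp only [List.contains_nil, Bool.false_and, Bool.or_false]
  by_cases hxp : x < past.length
  · rw [List.drop_append_of_le_length (by omega), List.any_append]
    have hsingle : ([r].any (fun r => r.contains w)) = r.contains w := by simp
    rw [hsingle]
    cases hA : (past.drop (x + 1)).any (fun r => r.contains w) with
    | true => simp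
    | false =>
      simp only [Bool.false_or]
      cases hR : r.contains w with
      | false => simp
      | true =>
        simp only [Bool.true_and]
        have hwpast : w ∈ past[x]?.getD [] := by rw [hpre x hxp]; exact hw
        have hidx : (List.idxOf? w (past[x]?.getD [])).isSome := List.isSome_idxOf?.2 hwpast
        cases hy : List.idxOf? w (past[x]?.getD []) with
        | none => rw [hy] at hidx; cases hidx
        | some y =>
          have := pvLastOcc_of_last past 0 w x y hxp hy hA
          rw [this]
          simp
  · have h1 : past.drop (x + 1) = [] := List.drop_of_length_le (by omega)
    have h2 : (past ++ [r]).drop (x + 1) = [] := List.drop_of_length_le (by simp; omega)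
    rw [h1, h2]
    simp only [List.any_nil, Bool.false_or]
    cases hL : pvLastOcc past 0 w with
    | none => simp
    | some pr =>
      obtain ⟨x0, hx0, hpr1, _, _⟩ := pvLastOcc_bounds past 0 w pr hL
      have hne : pr.1 ≠ (x : Int) := by omega
      simp [hne]

theorem outerA (M : List (List String)) :
    ∀ (rest past : List (List String)) (s : Int) (mat : List (List (Option String)))
      (m : PySem.Dict String (Int × Int)),
      M = past ++ rest → s = (past.length : Int) →
      MatInv M past [] mat → DictInv (past.length : Int) past [] m →
      MatInv M M []
        ((PySem.List.enumerate rest s).foldl (fun st p =>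
          (PySem.List.enumerate p.2).foldl (fun st q =>
            match PySem.Dict.get? st.2 q.2 with
            | some pos =>
              if pos.1 < p.1 then
                (PySem.List.pySetD st.1 pos.1
                   (PySem.List.pySetD (PySem.List.pyGetD st.1 pos.1 []) pos.2 none),
                 PySem.Dict.insert st.2 q.2 (p.1, q.1))
              else st
            | none => (st.1, PySem.Dict.insert st.2 q.2 (p.1, q.1))) st) (mat, m)).1 := by
  intro rest
  induction rest with
  | nil =>
    intro past s mat m hM hS hmat hdict
    have : past = M := by simpa using hM.symm
    subst this
    simpa [PySem.List.enumerate] using hmat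
  | cons r rs ih =>
    intro past s mat m hM hS hmat hdict
    subst hS
    have hlen : past.length < M.length := by rw [hM]; simp
    have hpre : ∀ x : Nat, x < past.length → past[x]? = M[x]? := by
      intro x hx
      rw [hM, List.getElem?_append_left hx]
    rw [PySem.List.enumerate_cons, List.foldl_cons]
    have hinner := innerA M past hlen hpre r [] mat m hmat hdict
    simp only [List.length_nil, Nat.cast_zero, List.nil_append] at hinner
    obtain ⟨hmat1, hdict1⟩ := hinner
    have hrM : M[past.length]? = some r := by
      rw [hM, List.getElem?_append_right (le_refl _)]
      simp
    have hmat2 : MatInv M (past ++ [r]) []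
        ((PySem.List.enumerate r 0).foldl (fun st q' =>
          match PySem.Dict.get? st.2 q'.2 with
          | some pos =>
            if pos.1 < ((past.length : Int)) then
              (PySem.List.pySetD st.1 pos.1
                 (PySem.List.pySetD (PySem.List.pyGetD st.1 pos.1 []) pos.2 none),
               PySem.Dict.insert st.2 q'.2 (((past.length : Int)), q'.1))
            else st
          | none => (st.1, PySem.Dict.insert st.2 q'.2 (((past.length : Int)), q'.1))) (mat, m)).1 := by
      refine ⟨hmat1.1, fun x hx => ?_⟩
      rw [hmat1.2 x hx]
      congr 1
      exact markRowList_congr _ _ _ _ (fun w hw _ => pvCond_step M past r hlen hrM hpre x hx w hw)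
    have hdict2 : DictInv (((past ++ [r]).length : Int)) (past ++ [r]) []
        ((PySem.List.enumerate r 0).foldl (fun st q' =>
          match PySem.Dict.get? st.2 q'.2 with
          | some pos =>
            if pos.1 < ((past.length : Int)) then
              (PySem.List.pySetD st.1 pos.1
                 (PySem.List.pySetD (PySem.List.pyGetD st.1 pos.1 []) pos.2 none),
               PySem.Dict.insert st.2 q'.2 (((past.length : Int)), q'.1))
            else st
          | none => (st.1, PySem.Dict.insert st.2 q'.2 (((past.length : Int)), q'.1))) (mat, m)).2 := by
      intro w
      rw [hdict1 w]
      simp only [List.idxOf?_nil]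
      rw [pvLastOcc_append_singleton]
      cases hj : List.idxOf? w r with
      | some j => simp
      | none => rfl
    have hM' : M = (past ++ [r]) ++ rs := by rw [hM]; simp
    have hs' : ((past.length : Int) + 1) = (((past ++ [r]).length : Nat) : Int) := by simp
    rw [hs']
    have := ih (past ++ [r]) (((past ++ [r]).length : Nat) : Int) _ _ hM' rfl hmat2 hdict2
    simpa using this

theorem A_final (M : List (List String)) :
    MatInv M M []
      ((PySem.List.enumerate M).foldl (fun st p =>
        (PySem.List.enumerate p.2).foldl (fun st q =>
          match PySem.Dict.get? st.2 q.2 with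
          | some pos =>
            if pos.1 < p.1 then
              (PySem.List.pySetD st.1 pos.1
                 (PySem.List.pySetD (PySem.List.pyGetD st.1 pos.1 []) pos.2 none),
               PySem.Dict.insert st.2 q.2 (p.1, q.1))
            else st
          | none => (st.1, PySem.Dict.insert st.2 q.2 (p.1, q.1))) st)
        (M.map (fun row => row.map some), PySem.Dict.empty)).1 := by
  have hmat0 : MatInv M [] [] (M.map (fun row => row.map some)) := by
    refine ⟨by simp, fun x hx => ?_⟩
    rw [List.getElem?_map, List.getElem?_eq_getElem hx]
    simp only [Option.map_some, Option.getD_some]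
    congr 1
    rw [markRowList_map_some _ _ _ (fun w _ => by simp [pvCond])]
  have hdict0 : DictInv ((([] : List (List String)).length : Int)) [] [] PySem.Dict.empty := by
    intro w
    rw [PySem.Dict.get?_empty]
    simp [pvLastOcc]
  exact outerA M M [] 0 _ _ (by simp) (by simp) hmat0 hdict0

theorem A_rows (M : List (List String)) (x : Nat) (hx : x < M.length) :
    (removeLowTargets M)[x]? =
      some (canonGo (fun w => (M.drop (x + 1)).any (fun r => r.contains w)) [] (M[x]?.getD [])) := by
  have hfin := A_final M
  unfold removeLowTargets
  simp only []
  rw [List.getElem?_map, hfin.2 x hx]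
  simp only [Option.map_some]
  rw [foldl_filter_none, List.nil_append, filterMap_markRowList]
  congr 1
  apply canonGo_congr
  intro w _ _
  simp [pvCond]

theorem A_length (M : List (List String)) : (removeLowTargets M).length = M.length := by
  have hfin := A_final M
  unfold removeLowTargets
  simp only []
  rw [List.length_map, hfin.1]

theorem B_rowdict (r : List String) (d : PySem.Dict String Int) (i : Int) (v : String) :
    PySem.Dict.get? (r.foldl (fun d v => PySem.Dict.insert d v i) d) v
      = if r.contains v then some i else PySem.Dict.get? d v := by
  induction r generalizing d with
  | nil => simp
  | cons w q ih =>
    rw [List.foldl_cons, ih]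
    by_cases hv : v ∈ q
    · simp [hv]
    · have hv' : q.contains v = false := by simpa using hv
      simp only [hv', List.contains_cons, if_false, Bool.false_eq_true]
      by_cases hw : v = w
      · subst hw; simp [PySem.Dict.get?_insert]
      · simp [PySem.Dict.get?_insert, hw, Bool.false_or,
          show (v == w) = false by simp [hw]]

theorem B_dict (rest : List (List String)) :
    ∀ (s : Int) (d : PySem.Dict String Int) (v : String),
      PySem.Dict.get?
        ((PySem.List.enumerate rest s).foldl
          (fun d p => p.2.foldl (fun d v => PySem.Dict.insert d v p.1) d) d) v
      = match pvLastOcc rest s v with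
        | some pr => some pr.1
        | none => PySem.Dict.get? d v := by
  induction rest with
  | nil => intro s d v; simp [PySem.List.enumerate, pvLastOcc]
  | cons r rs ih =>
    intro s d v
    rw [PySem.List.enumerate_cons, List.foldl_cons, ih (s + 1), pvLastOcc]
    cases hrs : pvLastOcc rs (s + 1) v with
    | some pr => simp
    | none =>
      simp only
      rw [B_rowdict]
      cases hj : r.idxOf? v with
      | some j =>
        have hcv : r.contains v = true := by
          have := List.isSome_idxOf?.1 (by rw [hj]; rfl)
          simpa using this
        have hm : v ∈ r := by simpa using hcv
        simp [hcv, hm]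
      | none =>
        have hcv : r.contains v = false := by
          cases hc : r.contains v with
          | false => rfl
          | true =>
            have : v ∈ r := by simpa using hc
            have := List.isSome_idxOf?.2 this
            rw [hj] at this; cases this
        have hm : v ∉ r := by simpa using hcv
        simp [hcv, hm]

theorem B_rowgo (G : String → Prop) [DecidablePred G] :
    ∀ (q pre : List String) (dropped : PySem.Set String) (acc : List String),
      (∀ w, dropped.contains w = (pre.contains w && decide (G w))) →
      (q.foldl (fun (st : PySem.Set String × List String) v =>
          if PySem.Set.contains st.1 v = false ∧ G v
          then (PySem.Set.add st.1 v, st.2)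
          else (st.1, st.2 ++ [v])) (dropped, acc)).2
        = acc ++ canonGo (fun w => decide (G w)) pre q := by
  intro q
  induction q with
  | nil => intro pre dropped acc _; simp [canonGo]
  | cons v q ih =>
    intro pre dropped acc hinv
    rw [List.foldl_cons, canonGo]
    by_cases hC : PySem.Set.contains dropped v = false ∧ G v
    · have hg : decide (G v) = true := by simp [hC.2]
      have hpre : pre.contains v = false := by
        have := hinv v
        rw [hC.1, hg] at this
        simpa using this.symm
      rw [if_pos hC, if_pos ⟨hpre, hg⟩]
      apply ih (pre ++ [v]) (dropped.add v) acc
      intro w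
      by_cases hw : w = v
      · subst hw
        have h1 : (dropped.add w).contains w = true := by
          rw [PySem.Set.contains_iff]; rw [PySem.Set.mem_add]; right; rfl
        rw [h1, hg]
        simp
      · have h1 : (dropped.add v).contains w = dropped.contains w := by
          rcases h2 : dropped.contains w with _ | _
          · rw [← Bool.not_eq_true, PySem.Set.contains_iff, PySem.Set.mem_add]
            rintro (h | h)
            · have := (PySem.Set.contains_iff dropped w).2 h
              rw [h2] at this; cases this
            · exact hw h
          · rw [PySem.Set.contains_iff, PySem.Set.mem_add]
            left
            rw [← PySem.Set.contains_iff, h2]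
        rw [h1, hinv w]
        congr 1
        simp [hw]
    · rw [if_neg hC]
      have hcond : ¬ (pre.contains v = false ∧ decide (G v) = true) := by
        intro hcontra
        apply hC
        constructor
        · rw [hinv v, hcontra.1]; simp
        · simpa using hcontra.2
      rw [if_neg hcond]
      have hinv' : ∀ w, dropped.contains w = ((pre ++ [v]).contains w && decide (G w)) := ?_
      · rw [ih (pre ++ [v]) dropped (acc ++ [v]) hinv']
        simp
      intro w
      by_cases hw : w = v
      · subst hw
        rw [hinv w]
        rcases hd : decide (G w) with _ | _
        · simp
        · have hpv : pre.contains w = true := by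
            by_contra hc
            exact hcond ⟨by simpa using hc, hd⟩
          have hpv' : w ∈ pre := by simpa using hpv
          simp [hpv', hd]
      · rw [hinv w]
        congr 1
        simp [hw]

theorem B_length (M : List (List String)) : (removeLowTargets_alt M).length = M.length := by
  unfold removeLowTargets_alt
  simp [PySem.List.length_enumerate]

theorem B_rows (M : List (List String)) (x : Nat) (hx : x < M.length) :
    (removeLowTargets_alt M)[x]? =
      some (canonGo (fun w => (M.drop (x + 1)).any (fun r => r.contains w)) [] (M[x]?.getD [])) := by
  unfold removeLowTargets_alt
  simp only [List.getElem?_map, PySem.List.getElem?_enumerate]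
  rw [List.getElem?_eq_getElem hx]
  simp only [Option.map_some]
  have hfold := B_rowgo (G := fun v => PySem.Dict.getD ((PySem.List.enumerate M).foldl
      (fun d p => p.2.foldl (fun d v => PySem.Dict.insert d v p.1) d) PySem.Dict.empty) v 0 > 0 + (x : Int))
      M[x] [] PySem.Set.empty [] (by intro w; simp [PySem.Set.empty, PySem.Set.contains])
  beta_reduce at hfold
  rw [hfold]
  simp only [Option.getD_some, List.nil_append]
  congr 1
  apply canonGo_congr
  intro w hw _
  -- glob agreement on members of row x
  have hge := pvLastOcc_ge M 0 w x hx (by rw [List.getElem?_eq_getElem hx]; simpa using hw)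
  obtain ⟨pr, hpr, hge⟩ := hge
  have hgetD : PySem.Dict.getD ((PySem.List.enumerate M).foldl
      (fun d p => p.2.foldl (fun d v => PySem.Dict.insert d v p.1) d) PySem.Dict.empty) w 0 = pr.1 := by
    rw [PySem.Dict.getD_eq_get?_getD, B_dict M 0 PySem.Dict.empty w, hpr]
    rfl
  rw [hgetD]
  rcases hany : (M.drop (x + 1)).any (fun r => r.contains w) with _ | _
  · -- no later row: pr.1 = x
    simp only [decide_eq_false_iff_not, not_lt]
    obtain ⟨x0, hx0, hpr1, hidx, _⟩ := pvLastOcc_bounds M 0 w pr hpr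
    have hx0le : x0 ≤ x := by
      by_contra hgt
      have hmem : w ∈ M[x0]?.getD [] := by
        have := List.isSome_idxOf?.1 (by rw [hidx]; rfl)
        exact this
      have : (M.drop (x + 1)).any (fun r => r.contains w) = true := by
        rw [List.any_eq_true]
        refine ⟨M[x0], ?_, ?_⟩
        · have : (M.drop (x + 1))[x0 - (x + 1)]? = some M[x0] := by
            rw [List.getElem?_drop]
            rw [show x + 1 + (x0 - (x + 1)) = x0 by omega]
            exact List.getElem?_eq_getElem hx0
          exact List.mem_of_getElem? this
        · rw [List.getElem?_eq_getElem hx0] at hmem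
          simpa using hmem
      rw [this] at hany; cases hany
    omega
  · simp only [decide_eq_true_eq]
    rw [List.any_eq_true] at hany
    obtain ⟨r, hr, hrw⟩ := hany
    obtain ⟨k, hk⟩ := List.mem_iff_getElem?.1 hr
    rw [List.getElem?_drop] at hk
    have hklen : x + 1 + k < M.length := by
      by_contra hc
      rw [List.getElem?_eq_none (by omega)] at hk; cases hk
    obtain ⟨pr', hpr', hge'⟩ := pvLastOcc_ge M 0 w (x + 1 + k)
      hklen (by rw [hk]; simpa using hrw)
    rw [hpr] at hpr'; cases hpr'
    omega

-- ===== VERDICT (by name: the statement is the Claim_ definition above) =====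
theorem removeLowTargets_spec : Claim_equal_removeLowTargets := by
  intro matric _
  unfold Spec_removeLowTargets
  apply List.ext_getElem?
  intro x
  by_cases hx : x < matric.length
  · rw [A_rows matric x hx, B_rows matric x hx]
  · rw [List.getElem?_eq_none (by rw [A_length]; omega),
        List.getElem?_eq_none (by rw [B_length]; omega)]
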